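-- pv_equiv track=rewrite | github.com/Gppovrm/Diskr | 1/zhegalkin.py | zhegalkin_reduce
-- ===== SOURCE A (Python) =====
-- def zhegalkin_reduce(tbl):
--     n = len(tbl[0]) - 1
--     tbl = [row[:] for row in tbl]
--     for j in range(len(tbl)):
--         for i in range(j):
--             if (i & j) == i:
--                 tbl[j][-1] = (tbl[j][-1] + tbl[i][-1]) % 2
--     return [row for row in tbl if row[-1] == 1]
-- ===== SOURCE B (Python) =====
-- def zhegalkin_reduce(tbl):
--     # In-place subset-sum (Mobius/SOS) transform on the last column, one
--     # pass per bit position: O(len * log(len)) value updates instead of the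
--     # O(len^2) pairwise scan.  Return value only; does not mutate tbl.
--     vals = [row[-1] for row in tbl]
--     k = 0
--     while (1 << k) < len(vals):
--         bit = 1 << k
--         for j in range(len(vals)):
--             if j & bit:
--                 vals[j] = (vals[j] + vals[j ^ bit]) % 2
--         k += 1
--     return [row[:-1] + [v] for row, v in zip(tbl, vals) if v == 1]
-- ===== Notes on version B (the rewrite author's own statement) =====
-- stated objective: alternative
-- what changed: Replaces A's O(L^2) pairwise subset scan (for every j, scan all i<j and add tbl[i][-1] when i&j==i) by the per-bit in-place Moebius/subset-sum transform on the extracted last column (one pass per bit position, combining v[j] with v[j^bit]; O(L log L) value updates), then reassembles and filters the rows in a single zip pass; B does not mutate its argument.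
import Mathlib
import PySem

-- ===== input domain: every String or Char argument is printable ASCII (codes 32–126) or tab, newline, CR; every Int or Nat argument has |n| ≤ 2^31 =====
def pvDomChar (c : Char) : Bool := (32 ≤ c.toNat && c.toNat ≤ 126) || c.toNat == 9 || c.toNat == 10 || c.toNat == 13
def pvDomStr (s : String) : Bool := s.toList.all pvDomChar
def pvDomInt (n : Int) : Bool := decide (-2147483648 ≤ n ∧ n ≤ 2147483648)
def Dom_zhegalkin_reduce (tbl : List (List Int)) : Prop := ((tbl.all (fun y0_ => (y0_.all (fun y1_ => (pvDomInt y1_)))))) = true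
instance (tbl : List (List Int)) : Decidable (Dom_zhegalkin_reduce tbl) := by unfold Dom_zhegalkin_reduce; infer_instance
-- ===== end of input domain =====

-- B replaces A's pairwise subset scan by the per-bit Moebius (subset-sum) transform on the
-- last column; return value only (A mutates only its local copy, B mutates nothing).

-- row[-1] (rows are nonempty on every admitted input; default 0 is never reached under Pre_)
def pvLast (r : List Int) : Int := (r.getLast?).getD 0
-- row[-1] = x  (Python list assignment to the last slot)
def pvSetLast (r : List Int) (x : Int) : List Int := r.dropLast ++ [x]

-- ===== PORT A =====
-- Python A: n = len(tbl[0]) - 1 is computed but never used (it raises IndexError on tbl = [],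
-- which Pre_ excludes); tbl = [row[:] for row in tbl] copies rows; then the double loop.
-- Int `%` here is Lean's emod, which agrees with Python's % for the positive divisor 2.
def zhegalkin_reduce (tbl : List (List Int)) : List (List Int) :=
  let t0 := tbl.map (fun r => r)      -- [row[:] for row in tbl]
  let t := (List.range t0.length).foldl (fun t j =>
    (List.range j).foldl (fun t i =>
      if i &&& j == i then
        t.set j (pvSetLast (t.getD j []) ((pvLast (t.getD j []) + pvLast (t.getD i [])) % 2))
      else t) t) t0
  t.filter (fun r => pvLast r == 1)

-- ===== PORT B =====
-- one pass of the subset-sum transform for bit `bit`: for j in range(len(v)): if j & bit: …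
def sosPass (bit : Nat) (v : List Int) : List Int :=
  (List.range v.length).foldl (fun v j =>
    if j &&& bit != 0 then
      v.set j ((v.getD j 0 + v.getD (j ^^^ bit) 0) % 2)
    else v) v

-- while (1 << k) < len(vals): … ; k += 1
def sosLoop (L k : Nat) (v : List Int) : List Int :=
  if 2 ^ k < L then sosLoop L (k + 1) (sosPass (2 ^ k) v) else v
termination_by L - k
decreasing_by have := Nat.lt_two_pow_self (n := k); omega

def zhegalkin_reduce_alt (tbl : List (List Int)) : List (List Int) :=
  let vals := sosLoop tbl.length 0 (tbl.map pvLast)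
  (tbl.zip vals).filterMap (fun rv =>
    if rv.2 == 1 then some (rv.1.dropLast ++ [rv.2]) else none)

-- ===== PRECONDITION & SPEC =====
-- Pre_ excludes exactly the inputs on which Python A raises IndexError:
-- the empty table (tbl[0]) and tables containing an empty row (row[-1]).
def Pre_zhegalkin_reduce (tbl : List (List Int)) : Prop :=
  tbl ≠ [] ∧ ∀ r ∈ tbl, r ≠ []
instance (tbl : List (List Int)) : Decidable (Pre_zhegalkin_reduce tbl) := by
  unfold Pre_zhegalkin_reduce; infer_instance

def pvWitness_zhegalkin_reduce : List (List Int) := [[0, 1], [1, 0], [0, 1], [1, 1]]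

def Spec_zhegalkin_reduce (tbl : List (List Int)) (out : List (List Int)) : Prop := out = zhegalkin_reduce_alt tbl
instance (tbl : List (List Int)) (out : List (List Int)) : Decidable (Spec_zhegalkin_reduce tbl out) := by unfold Spec_zhegalkin_reduce; infer_instance

-- ===== CLAIM (what is proved, stated in full; the proofs are below) =====
def Claim_equal_zhegalkin_reduce : Prop := ∀ (tbl : List (List Int)), Dom_zhegalkin_reduce tbl → Pre_zhegalkin_reduce tbl → Spec_zhegalkin_reduce tbl (zhegalkin_reduce tbl)

-- ===== LEMMAS AND PROOFS =====

/- ---------- bit toolkit ---------- -/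

-- i is a bitwise subset of j, as a quantifier over bits
theorem pv_subset_iff (i j : Nat) : i &&& j = i ↔ ∀ n, i.testBit n = true → j.testBit n = true := by
  constructor
  · intro h n hi
    have h2 := congrArg (fun x => Nat.testBit x n) h
    simp only [Nat.testBit_and, hi, Bool.true_and] at h2
    exact h2
  · intro h
    apply Nat.eq_of_testBit_eq
    intro n
    rw [Nat.testBit_and]
    cases hi : i.testBit n
    · simp
    · simp [h n hi]

-- testBit of the canonical decomposition around bit k
theorem pv_testBit_decomp (q c r k n : Nat) (hr : r < 2 ^ k) (hc : c ≤ 1) :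
    (2 ^ (k + 1) * q + c * 2 ^ k + r).testBit n =
      (if n < k then r.testBit n else if n = k then decide (c = 1) else q.testBit (n - k - 1)) := by
  have hp : 0 < 2 ^ k := Nat.two_pow_pos _
  rcases lt_trichotomy n k with hn | hn | hn
  · -- low bits come from r
    have hmod : (2 ^ (k + 1) * q + c * 2 ^ k + r) % 2 ^ k = r := by
      have : 2 ^ (k + 1) * q + c * 2 ^ k + r = 2 ^ k * (2 * q + c) + r := by ring
      rw [this, Nat.mul_add_mod, Nat.mod_eq_of_lt hr]
    have h2 := Nat.testBit_mod_two_pow (2 ^ (k + 1) * q + c * 2 ^ k + r) k n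
    rw [hmod] at h2
    simp only [hn, decide_true, Bool.true_and] at h2
    simp [hn, h2.symm]
  · -- bit k is c
    subst hn
    have hdiv : (2 ^ (n + 1) * q + c * 2 ^ n + r) / 2 ^ n = 2 * q + c := by
      have : 2 ^ (n + 1) * q + c * 2 ^ n + r = 2 ^ n * (2 * q + c) + r := by ring
      rw [this, Nat.mul_add_div hp, Nat.div_eq_of_lt hr, Nat.add_zero]
    have ht : (2 ^ (n + 1) * q + c * 2 ^ n + r).testBit n
        = ((2 ^ (n + 1) * q + c * 2 ^ n + r) / 2 ^ n).testBit 0 := by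
      rw [Nat.testBit_div_two_pow, Nat.zero_add]
    rw [ht, hdiv, Nat.testBit_zero]
    have h2 : (2 * q + c) % 2 = c := by omega
    rw [h2]
    simp
  · -- high bits come from q
    have hdiv : (2 ^ (k + 1) * q + c * 2 ^ k + r) / 2 ^ (k + 1) = q := by
      have : 2 ^ (k + 1) * q + c * 2 ^ k + r = 2 ^ (k + 1) * q + (c * 2 ^ k + r) := by ring
      rw [this, Nat.mul_add_div (Nat.two_pow_pos _), Nat.div_eq_of_lt, Nat.add_zero]
      have : c * 2 ^ k ≤ 2 ^ k := by
        calc c * 2 ^ k ≤ 1 * 2 ^ k := Nat.mul_le_mul_right _ hc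
        _ = 2 ^ k := Nat.one_mul _
      calc c * 2 ^ k + r < c * 2 ^ k + 2 ^ k := by omega
      _ ≤ 2 ^ k + 2 ^ k := by omega
      _ = 2 ^ (k + 1) := by ring
    have ht : (2 ^ (k + 1) * q + c * 2 ^ k + r).testBit n
        = ((2 ^ (k + 1) * q + c * 2 ^ k + r) / 2 ^ (k + 1)).testBit (n - k - 1) := by
      rw [Nat.testBit_div_two_pow]
      congr 1
      omega
    rw [ht, hdiv]
    have h1 : ¬ n < k := by omega
    have h2 : ¬ n = k := by omega
    simp [h1, h2]

-- every j splits as high part * 2^(k+1) + (bit k) * 2^k + low part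
theorem pv_decomp (j k : Nat) :
    j = 2 ^ (k + 1) * (j / 2 ^ (k + 1)) + (if j.testBit k then 1 else 0) * 2 ^ k + j % 2 ^ k ∧
      j % 2 ^ k < 2 ^ k := by
  have hp : 0 < 2 ^ k := Nat.two_pow_pos _
  refine ⟨?_, Nat.mod_lt _ hp⟩
  have hb : j.testBit k = decide (j / 2 ^ k % 2 = 1) := by
    rw [← Nat.testBit_zero (j / 2 ^ k), Nat.testBit_div_two_pow, Nat.zero_add]
  have hms := Nat.mod_pow_succ (x := j) (b := 2) (k := k)
  have hj : j = 2 ^ (k + 1) * (j / 2 ^ (k + 1)) + j % 2 ^ (k + 1) := (Nat.div_add_mod _ _).symm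
  cases hbit : j.testBit k
  · have : j / 2 ^ k % 2 = 0 := by
      rw [hb] at hbit
      simpa using hbit
    rw [this] at hms
    simp []
    omega
  · have : j / 2 ^ k % 2 = 1 := by
      rw [hb] at hbit
      simpa using hbit
    rw [this] at hms
    simp []
    omega

theorem pv_and_pow_ne_zero (j k : Nat) : (j &&& 2 ^ k ≠ 0) ↔ j.testBit k = true := by
  rw [Nat.and_two_pow]
  cases h : j.testBit k <;> simp []


/- ---------- subset lists and the parity core ---------- -/

-- the bitwise subsets of j, in increasing order (j included)
def subL (j : Nat) : List Nat := (List.range (j + 1)).filter (fun i => i &&& j == i)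
-- the proper subsets of j
def psubL (j : Nat) : List Nat := (List.range j).filter (fun i => i &&& j == i)

def gsum (w : Nat → Int) (j : Nat) : Int := ((subL j).map w).sum

-- the common value both transforms produce at index j
def Gv (w : Nat → Int) (j : Nat) : Int := if j = 0 then w 0 else gsum w j % 2

theorem pv_tb_high {x k n : Nat} (hx : x < 2 ^ k) (hn : k ≤ n) : x.testBit n = false :=
  Nat.testBit_lt_two_pow (lt_of_lt_of_le hx (Nat.pow_le_pow_right (by norm_num) hn))

theorem pv_tb_pow_add {r k : Nat} (hr : r < 2 ^ k) (n : Nat) :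
    (2 ^ k + r).testBit n = (decide (n = k) || r.testBit n) := by
  have h := pv_testBit_decomp 0 1 r k n hr (le_refl 1)
  have he : 2 ^ (k + 1) * 0 + 1 * 2 ^ k + r = 2 ^ k + r := by ring
  rw [he] at h
  rw [h]
  rcases lt_trichotomy n k with hn | hn | hn
  · simp [hn, Nat.ne_of_lt hn]
  · simp [hn]
  · have h1 : ¬ n < k := by omega
    have h2 : n ≠ k := by omega
    simp [h1, h2, pv_tb_high hr (le_of_lt hn)]

theorem pv_sub_low {i r k : Nat} (hi : i < 2 ^ k) (hr : r < 2 ^ k) :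
    (i &&& (2 ^ k + r) = i) ↔ (i &&& r = i) := by
  rw [pv_subset_iff, pv_subset_iff]
  constructor
  · intro h n hn
    have hnk : n < k := by
      by_contra hge
      rw [pv_tb_high hi (by omega)] at hn
      exact Bool.false_ne_true hn
    have := h n hn
    rw [pv_tb_pow_add hr] at this
    simpa [Nat.ne_of_lt hnk] using this
  · intro h n hn
    rw [pv_tb_pow_add hr]
    simp [h n hn]

theorem pv_sub_high {i r k : Nat} (hi : i < 2 ^ k) (hr : r < 2 ^ k) :
    ((2 ^ k + i) &&& (2 ^ k + r) = 2 ^ k + i) ↔ (i &&& r = i) := by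
  rw [pv_subset_iff, pv_subset_iff]
  constructor
  · intro h n hn
    have hnk : n < k := by
      by_contra hge
      rw [pv_tb_high hi (by omega)] at hn
      exact Bool.false_ne_true hn
    have h2 := h n (by rw [pv_tb_pow_add hi]; simp [hn])
    rw [pv_tb_pow_add hr] at h2
    simpa [Nat.ne_of_lt hnk] using h2
  · intro h n hn
    rw [pv_tb_pow_add hi] at hn
    rw [pv_tb_pow_add hr]
    by_cases hk : n = k
    · simp [hk]
    · simp only [hk, decide_false, Bool.false_or] at hn
      simp [h n hn]

theorem pv_filter_range_cut (p : Nat → Bool) {b c : Nat} (hcb : c ≤ b)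
    (h : ∀ i, p i = true → i < c) :
    (List.range b).filter p = (List.range c).filter p := by
  have hb : b = c + (b - c) := by omega
  rw [hb, List.range_add, List.filter_append]
  have : ((List.range (b - c)).map (fun x => c + x)).filter p = [] := by
    rw [List.filter_eq_nil_iff]
    intro a ha
    rcases List.mem_map.mp ha with ⟨x, _, rfl⟩
    intro hp
    have := h _ hp
    omega
  rw [this, List.append_nil]

theorem subL_eq (j : Nat) : subL j = psubL j ++ [j] := by
  unfold subL psubL
  rw [List.range_succ, List.filter_append]
  simp [Nat.and_self]

theorem mem_psubL {i j : Nat} : i ∈ psubL j ↔ i < j ∧ i &&& j = i := by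
  simp [psubL, List.mem_filter, List.mem_range]

theorem mem_subL {i j : Nat} : i ∈ subL j ↔ i ≤ j ∧ i &&& j = i := by
  simp [subL, List.mem_filter, List.mem_range]

-- splitting the subset lattice of 2^k + r at bit k
theorem subL_split {k r : Nat} (hr : r < 2 ^ k) :
    subL (2 ^ k + r) = subL r ++ (subL r).map (fun i => 2 ^ k + i) := by
  unfold subL
  have h1 : List.range (2 ^ k + r + 1) =
      List.range (2 ^ k) ++ (List.range (r + 1)).map (fun x => 2 ^ k + x) := by
    have : 2 ^ k + r + 1 = 2 ^ k + (r + 1) := by omega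
    rw [this, List.range_add]
  rw [h1, List.filter_append, List.filter_map]
  congr 1
  · -- low half
    have hcut : (List.range (2 ^ k)).filter (fun i => i &&& (2 ^ k + r) == i)
        = (List.range (2 ^ k)).filter (fun i => i &&& r == i) := by
      apply List.filter_congr
      intro i hi
      have hi' : i < 2 ^ k := List.mem_range.mp hi
      rw [Bool.eq_iff_iff]
      simp only [beq_iff_eq]
      exact pv_sub_low hi' hr
    rw [hcut]
    apply pv_filter_range_cut _ (by omega)
    intro i hp
    have : i &&& r = i := by simpa using hp
    have : i ≤ r := by rw [← this]; exact Nat.and_le_right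
    omega
  · -- high half
    congr 1
    apply List.filter_congr
    intro i hi
    have hi' : i < 2 ^ k := by
      have := List.mem_range.mp hi
      omega
    rw [Bool.eq_iff_iff]
    simp only [Function.comp, beq_iff_eq]
    exact pv_sub_high hi' hr

theorem gsum_split {k r : Nat} (hr : r < 2 ^ k) (w : Nat → Int) :
    gsum w (2 ^ k + r) = gsum w r + gsum (fun i => w (2 ^ k + i)) r := by
  unfold gsum
  rw [subL_split hr, List.map_append, List.sum_append, List.map_map]
  rfl

theorem pv_sum_modeq {l : List Nat} {f g : Nat → Int}
    (h : ∀ i ∈ l, Int.ModEq 2 (f i) (g i)) :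
    Int.ModEq 2 ((l.map f).sum) ((l.map g).sum) := by
  induction l with
  | nil => rfl
  | cons a l ih =>
      simp only [List.map_cons, List.sum_cons]
      exact Int.ModEq.add (h a (by simp)) (ih (fun i hi => h i (by simp [hi])))

theorem pv_sum_map_add (l : List Nat) (f g : Nat → Int) :
    (l.map (fun i => f i + g i)).sum = (l.map f).sum + (l.map g).sum := by
  induction l with
  | nil => simp
  | cons a l ih => simp [ih]; ring

-- the Moebius parity identity, by induction on the bits of j
theorem pv_moebius (j : Nat) : ∀ w : Nat → Int,
    Int.ModEq 2 (((subL j).map (gsum w)).sum) (gsum w j + ((subL j).map w).sum + w j) := by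
  induction j using Nat.strong_induction_on with
  | _ j ih =>
    intro w
    by_cases hj : j = 0
    · subst hj
      have h0 : subL 0 = [0] := by decide
      rw [h0]
      simp only [List.map_cons, List.map_nil, List.sum_cons, List.sum_nil]
      have hg : gsum w 0 = w 0 := by rw [gsum, h0]; simp
      rw [hg, Int.modEq_iff_dvd]
      exact ⟨w 0, by ring⟩
    · -- split off the highest bit
      set k := Nat.log2 j with hk
      have hk1 : 2 ^ k ≤ j := Nat.log2_self_le hj
      have hk2 : j < 2 ^ (k + 1) := Nat.lt_log2_self
      have hpow : 2 ^ (k + 1) = 2 * 2 ^ k := by ring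
      set m := j - 2 ^ k with hm
      have hmlt : m < 2 ^ k := by omega
      have hjm : j = 2 ^ k + m := by omega
      set w' : Nat → Int := fun i => w (2 ^ k + i) with hw'
      have hmem : ∀ i ∈ subL m, i < 2 ^ k := by
        intro i hi
        have := (mem_subL.mp hi).1
        omega
      -- rewrite the subset list of j
      rw [hjm, subL_split hmlt, List.map_append, List.sum_append, List.map_map,
          List.map_append, List.sum_append, List.map_map]
      have hsplit2 : ((subL m).map (gsum w ∘ fun i => 2 ^ k + i)).sum
          = ((subL m).map (fun i => gsum w i + gsum w' i)).sum := by
        congr 1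
        apply List.map_congr_left
        intro i hi
        exact gsum_split (hmem i hi) w
      rw [hsplit2, pv_sum_map_add]
      have hihm := ih m (by omega) w'
      have hgj : gsum w (2 ^ k + m) = gsum w m + gsum w' m := gsum_split hmlt w
      have hwcomp : ((subL m).map (w ∘ fun i => 2 ^ k + i)).sum = ((subL m).map w').sum := rfl
      rw [hwcomp, hgj]
      have hgm : gsum w m = ((subL m).map w).sum := rfl
      rw [Int.modEq_iff_dvd] at hihm ⊢
      rcases hihm with ⟨c, hc⟩
      refine ⟨c + gsum w m - ((subL m).map (gsum w)).sum, ?_⟩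
      have hww : w (2 ^ k + m) = w' m := rfl
      rw [hww]
      rw [← hgm]
      linarith [hc]

theorem pv_moebius_psub (j : Nat) (w : Nat → Int) :
    Int.ModEq 2 (((psubL j).map (gsum w)).sum) (((psubL j).map w).sum) := by
  have h := pv_moebius j w
  rw [subL_eq, List.map_append, List.sum_append, List.map_append, List.sum_append] at h
  simp only [List.map_cons, List.map_nil, List.sum_cons, List.sum_nil, Int.add_zero] at h
  rw [Int.modEq_iff_dvd] at h ⊢
  have hgj : gsum w j = ((psubL j).map w).sum + w j := by
    rw [gsum, subL_eq, List.map_append, List.sum_append]; simp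
  rw [hgj] at h
  omega

-- the sequential recurrence satisfied by Gv
theorem Gv_rec {j : Nat} (hj : j ≠ 0) (w : Nat → Int) :
    (w j + ((psubL j).map (Gv w)).sum) % 2 = Gv w j := by
  have h1 : Int.ModEq 2 (((psubL j).map (Gv w)).sum) (((psubL j).map w).sum) := by
    refine Int.ModEq.trans (pv_sum_modeq ?_) (pv_moebius_psub j w)
    intro i hi
    by_cases hi0 : i = 0
    · subst hi0
      have : gsum w 0 = w 0 := by rw [gsum]; simp [show subL 0 = [0] from by decide]
      simp [Gv, this]
    · simp only [Gv, hi0, if_false]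
      exact Int.emod_emod_of_dvd _ (dvd_refl 2)
  have h2 : Int.ModEq 2 (w j + ((psubL j).map (Gv w)).sum) (gsum w j) := by
    have hgj : gsum w j = ((psubL j).map w).sum + w j := by
      rw [gsum, subL_eq, List.map_append, List.sum_append]; simp
    rw [hgj]
    calc w j + ((psubL j).map (Gv w)).sum
        ≡ w j + ((psubL j).map w).sum [ZMOD 2] := Int.ModEq.add_left _ h1
      _ = ((psubL j).map w).sum + w j := by ring
  rw [Gv, if_neg hj]
  exact h2

/- ---------- A-side: the double loop computes Gv ---------- -/

theorem pvLast_setLast (r : List Int) (x : Int) : pvLast (pvSetLast r x) = x := by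
  simp [pvLast, pvSetLast]

theorem pvSetLast_setLast (r : List Int) (x y : Int) :
    pvSetLast (pvSetLast r x) y = pvSetLast r y := by
  simp [pvSetLast]

theorem pvSetLast_last {r : List Int} (h : r ≠ []) : pvSetLast r (pvLast r) = r := by
  have := List.dropLast_append_getLast h
  rw [pvSetLast, pvLast, List.getLast?_eq_some_getLast h]
  simpa using this

-- the inner loop only rewrites row c's last slot, accumulating over the other rows
theorem pv_inner_eq (c : Nat) (l : List Nat) (t : List (List Int))
    (hl : ∀ i ∈ l, i ≠ c) :
    l.foldl (fun t i =>
      if i &&& c == i then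
        t.set c (pvSetLast (t.getD c []) ((pvLast (t.getD c []) + pvLast (t.getD i [])) % 2))
      else t) t =
    (if ((l.filter (fun i => i &&& c == i)).isEmpty) then t else
      t.set c (pvSetLast (t.getD c [])
        ((pvLast (t.getD c []) +
          (((l.filter (fun i => i &&& c == i)).map (fun i => pvLast (t.getD i []))).sum)) % 2))) := by
  induction l generalizing t with
  | nil => simp
  | cons i l ih =>
      by_cases hc : c < t.length
      case neg =>
        -- out of range: set is a no-op everywhere; both sides collapse
        have hset : ∀ y, t.set c y = t := fun y => List.set_eq_of_length_le (by omega)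
        have hfold : ∀ (l' : List Nat), l'.foldl (fun t i =>
            if i &&& c == i then
              t.set c (pvSetLast (t.getD c []) ((pvLast (t.getD c []) + pvLast (t.getD i [])) % 2))
            else t) t = t := by
          intro l'
          induction l' with
          | nil => rfl
          | cons a l' ihl => simp only [List.foldl_cons, hset]; split <;> exact ihl
        rw [hfold]
        split
        · rfl
        · rw [hset]
      case pos =>
        have hi : i ≠ c := hl i (by simp)
        cases hp : (i &&& c == i)
        · simp only [List.foldl_cons, List.filter_cons, hp, Bool.false_eq_true,
            not_false_eq_true, if_neg]
          exact ih t (fun a ha => hl a (by simp [ha]))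
        · simp only [List.foldl_cons, List.filter_cons, hp, ite_true]
          set rc := t.getD c [] with hrc
          set x' := (pvLast rc + pvLast (t.getD i [])) % 2 with hx'
          set t' := t.set c (pvSetLast rc x') with ht'
          have hlen' : t'.length = t.length := List.length_set
          have hgc : t'.getD c [] = pvSetLast rc x' := by
            rw [ht', List.getD_eq_getElem?_getD, List.getElem?_set_self hc]
            rfl
          have hgne : ∀ a, a ≠ c → t'.getD a [] = t.getD a [] := by
            intro a ha
            rw [ht', List.getD_eq_getElem?_getD, List.getElem?_set_ne (fun h => ha h.symm),
              ← List.getD_eq_getElem?_getD]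
          rw [ih t' (fun a ha => hl a (by simp [ha]))]
          have hmapeq : (l.filter (fun i => i &&& c == i)).map (fun a => pvLast (t'.getD a []))
              = (l.filter (fun i => i &&& c == i)).map (fun a => pvLast (t.getD a [])) := by
            apply List.map_congr_left
            intro a ha
            rw [hgne a (hl a (by simp [List.mem_of_mem_filter ha]))]
          by_cases he : (l.filter (fun i => i &&& c == i)).isEmpty
          · simp only [he, ite_true, List.isEmpty_cons, Bool.false_eq_true, if_neg,
              not_false_eq_true]
            rw [ht']
            have : ((l.filter (fun i => i &&& c == i)).map (fun i => pvLast (t.getD i []))).sum = 0 := by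
              rw [List.isEmpty_iff.mp he]; rfl
            rw [List.map_cons, List.sum_cons, this, add_zero]
          · simp only [he, List.isEmpty_cons, Bool.false_eq_true, if_neg,
              not_false_eq_true]
            rw [hgc, hmapeq, pvLast_setLast, pvSetLast_setLast, ht', List.set_set]
            congr 2
            rw [List.map_cons, List.sum_cons, hx', Int.emod_add_emod]
            ring_nf

-- the model of A's table after the first c outer iterations
def modelT (tbl : List (List Int)) (w : Nat → Int) (c : Nat) : List (List Int) :=
  tbl.mapIdx (fun j r => if j < c then pvSetLast r (Gv w j) else r)

theorem pv_outer_model (tbl : List (List Int)) (hne : ∀ r ∈ tbl, r ≠ [])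
    (c : Nat) (hc : c ≤ tbl.length) :
    (List.range c).foldl (fun t j =>
      (List.range j).foldl (fun t i =>
        if i &&& j == i then
          t.set j (pvSetLast (t.getD j []) ((pvLast (t.getD j []) + pvLast (t.getD i [])) % 2))
        else t) t) tbl
      = modelT tbl (fun i => pvLast (tbl.getD i [])) c := by
  set w : Nat → Int := fun i => pvLast (tbl.getD i []) with hw
  have hgdlt : ∀ (t : List (List Int)) (j : Nat) (h : j < t.length), t.getD j [] = t[j] := by
    intro t j h
    rw [List.getD_eq_getElem?_getD, List.getElem?_eq_getElem h]
    rfl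
  have hlenM : ∀ c, (modelT tbl w c).length = tbl.length := fun _ => List.length_mapIdx
  have hgd : ∀ c j, j < tbl.length → (modelT tbl w c).getD j []
      = if j < c then pvSetLast (tbl.getD j []) (Gv w j) else tbl.getD j [] := by
    intro c j hj
    rw [hgdlt _ j (by rw [hlenM]; exact hj)]
    simp only [modelT, List.getElem_mapIdx]
    rw [hgdlt _ j hj]
  induction c with
  | zero =>
      rw [List.range_zero, List.foldl_nil]
      apply List.ext_getElem (by rw [hlenM])
      intro j h1 h2
      simp only [modelT, List.getElem_mapIdx]
      simp
  | succ c ihc =>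
      have hc' : c < tbl.length := by omega
      rw [List.range_succ, List.foldl_append, ihc (by omega), List.foldl_cons, List.foldl_nil]
      rw [pv_inner_eq c (List.range c) (modelT tbl w c)
        (fun i hi => by have := List.mem_range.mp hi; omega)]
      have hfilt : (List.range c).filter (fun i => i &&& c == i) = psubL c := rfl
      have hrowc : (modelT tbl w c).getD c [] = tbl.getD c [] := by
        rw [hgd c c hc']; simp
      by_cases hc0 : c = 0
      · subst hc0
        have : ((List.range 0).filter (fun i => i &&& 0 == i)).isEmpty = true := rfl
        rw [if_pos this]
        apply List.ext_getElem (by rw [hlenM, hlenM])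
        intro j h1 h2
        simp only [modelT, List.getElem_mapIdx]
        by_cases hj0 : j = 0
        · subst hj0
          have hne0 : tbl[0] ≠ [] := hne _ (List.getElem_mem _)
          have hG : Gv w 0 = pvLast tbl[0] := by
            rw [Gv, if_pos rfl, hw]
            simp only []
            rw [hgdlt tbl 0 (by omega)]
          simp [hG, pvSetLast_last hne0]
        · have h1' : ¬ j < 0 := by omega
          have h2' : ¬ j < 1 := by omega
          simp [h1', h2']
      · -- c ≥ 1 : the filter is nonempty (0 is a proper subset of c)
        have h0mem : 0 ∈ psubL c := mem_psubL.mpr ⟨by omega, Nat.zero_and c⟩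
        have hnonempty : (psubL c).isEmpty = false := by
          rw [List.isEmpty_eq_false_iff_exists_mem]
          exact ⟨0, h0mem⟩
        rw [hfilt, hnonempty]
        simp only [Bool.false_eq_true, if_neg, not_false_eq_true]
        have hmap : (psubL c).map (fun i => pvLast ((modelT tbl w c).getD i []))
            = (psubL c).map (Gv w) := by
          apply List.map_congr_left
          intro i hi
          have hic : i < c := (mem_psubL.mp hi).1
          rw [hgd c i (by omega), if_pos hic, pvLast_setLast]
        rw [hrowc, hmap]
        have hval : (pvLast (tbl.getD c []) + ((psubL c).map (Gv w)).sum) % 2 = Gv w c := by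
          have := Gv_rec (j := c) hc0 w
          rw [hw] at this ⊢
          exact this
        rw [hval]
        apply List.ext_getElem (by rw [List.length_set, hlenM, hlenM])
        intro j h1 h2
        have hjlen : j < tbl.length := by
          have := h2; rw [hlenM] at this; exact this
        rw [List.getElem_set]
        simp only [modelT, List.getElem_mapIdx]
        by_cases hjc : c = j
        · subst hjc
          rw [if_pos rfl, if_pos (by omega), hgdlt tbl c hjlen]
        · rw [if_neg hjc]
          have : (j < c + 1) ↔ (j < c) := by omega
          by_cases hjlt : j < c
          · rw [if_pos hjlt, if_pos (by omega)]
          · rw [if_neg hjlt, if_neg (by omega)]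

/- ---------- B-side: the per-bit passes compute Gv ---------- -/

-- value at index j after the passes for bits 2^0 … 2^(k-1)
def Vfun (w : Nat → Int) (k j : Nat) : Int :=
  if j % 2 ^ k = 0 then w j
  else gsum (fun l => w (j - j % 2 ^ k + l)) (j % 2 ^ k) % 2

theorem gsum_zero (w : Nat → Int) : gsum w 0 = w 0 := by
  rw [gsum]
  simp [show subL 0 = [0] from by decide]

theorem gsum_congr {w w' : Nat → Int} (h : ∀ i, w i = w' i) (j : Nat) : gsum w j = gsum w' j := by
  rw [gsum, gsum]
  exact congrArg _ (List.map_congr_left fun a _ => h a)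

-- clearing a set bit k of j
theorem pv_xor_pow {j k : Nat} (h : j.testBit k = true) :
    (j ^^^ 2 ^ k) + 2 ^ k = j ∧ (j ^^^ 2 ^ k).testBit k = false := by
  constructor
  · obtain ⟨hd, hr⟩ := pv_decomp j k
    rw [h, if_pos rfl] at hd
    set q := j / 2 ^ (k + 1)
    set r := j % 2 ^ k
    have hx : j ^^^ 2 ^ k = 2 ^ (k + 1) * q + 0 * 2 ^ k + r := by
      apply Nat.eq_of_testBit_eq
      intro n
      rw [Nat.testBit_xor, pv_testBit_decomp q 0 r k n hr (by norm_num)]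
      conv_lhs => rw [hd]
      rw [pv_testBit_decomp q 1 r k n hr (le_refl 1)]
      rcases lt_trichotomy n k with hn | hn | hn
      · simp [hn, Nat.testBit_two_pow_of_ne (by omega : k ≠ n)]
      · subst hn
        simp [Nat.testBit_two_pow_self]
      · have h1 : ¬ n < k := by omega
        have h2 : n ≠ k := by omega
        simp [h1, h2, Nat.testBit_two_pow_of_ne (by omega : k ≠ n)]
    rw [Nat.zero_mul, Nat.add_zero] at hx
    rw [Nat.one_mul] at hd
    omega
  · rw [Nat.testBit_xor, h, Nat.testBit_two_pow_self]
    rfl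

theorem sosPass_length (bit : Nat) (v : List Int) : (sosPass bit v).length = v.length := by
  rw [sosPass]
  generalize List.range v.length = l
  induction l generalizing v with
  | nil => rfl
  | cons a l ih =>
      rw [List.foldl_cons]
      split
      · rw [ih]; exact List.length_set
      · exact ih v

theorem sosPass_getD (k : Nat) (v : List Int) (j : Nat) (hj : j < v.length) :
    (sosPass (2 ^ k) v).getD j 0 =
      if j &&& 2 ^ k != 0 then (v.getD j 0 + v.getD (j ^^^ 2 ^ k) 0) % 2 else v.getD j 0 := by
  have H : ∀ c, c ≤ v.length →
      (((List.range c).foldl (fun v j =>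
        if j &&& 2 ^ k != 0 then
          v.set j ((v.getD j 0 + v.getD (j ^^^ 2 ^ k) 0) % 2)
        else v) v).length = v.length ∧
      ∀ i, ((List.range c).foldl (fun v j =>
        if j &&& 2 ^ k != 0 then
          v.set j ((v.getD j 0 + v.getD (j ^^^ 2 ^ k) 0) % 2)
        else v) v).getD i 0 =
        if i < c ∧ (i &&& 2 ^ k != 0) = true then (v.getD i 0 + v.getD (i ^^^ 2 ^ k) 0) % 2
        else v.getD i 0) := by
    intro c
    induction c with
    | zero =>
        intro _
        refine ⟨rfl, fun i => ?_⟩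
        simp
    | succ c ih =>
        intro hcle
        obtain ⟨ihlen, ihval⟩ := ih (by omega)
        have hc : c < v.length := by omega
        rw [List.range_succ, List.foldl_append, List.foldl_cons, List.foldl_nil]
        set u := (List.range c).foldl (fun v j =>
          if j &&& 2 ^ k != 0 then
            v.set j ((v.getD j 0 + v.getD (j ^^^ 2 ^ k) 0) % 2)
          else v) v with hu
        cases hbc : (c &&& 2 ^ k != 0)
        · rw [if_neg (by simp [])]
          refine ⟨ihlen, fun i => ?_⟩
          rw [ihval i]
          by_cases hic : i = c
          · subst hic
            simp [hbc]
          · have : (i < c + 1 ∧ (i &&& 2 ^ k != 0) = true) ↔ (i < c ∧ (i &&& 2 ^ k != 0) = true) := by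
              constructor
              · rintro ⟨h1, h2⟩; exact ⟨by omega, h2⟩
              · rintro ⟨h1, h2⟩; exact ⟨by omega, h2⟩
            by_cases hcond : i < c ∧ (i &&& 2 ^ k != 0) = true
            · rw [if_pos hcond, if_pos (this.mpr hcond)]
            · rw [if_neg hcond, if_neg (this.mp.mt hcond)]
        · rw [if_pos (by simp [])]
          have htb : c.testBit k = true := by
            apply (pv_and_pow_ne_zero c k).mp
            simpa using hbc
          obtain ⟨hxsum, hxbit⟩ := pv_xor_pow htb
          have hxlt : c ^^^ 2 ^ k < c := by
            have := Nat.two_pow_pos k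
            omega
          have hxcond : ((c ^^^ 2 ^ k) &&& 2 ^ k != 0) = false := by
            have hz : (c ^^^ 2 ^ k) &&& 2 ^ k = 0 := by
              by_contra hne
              rw [(pv_and_pow_ne_zero _ _).mp hne] at hxbit
              simp at hxbit
            simp [hz]
          have hgc : u.getD c 0 = v.getD c 0 := by
            rw [ihval c]
            simp
          have hgx : u.getD (c ^^^ 2 ^ k) 0 = v.getD (c ^^^ 2 ^ k) 0 := by
            rw [ihval (c ^^^ 2 ^ k)]
            simp [hxcond]
          refine ⟨by rw [List.length_set, ihlen], fun i => ?_⟩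
          by_cases hic : i = c
          · subst hic
            rw [List.getD_eq_getElem?_getD, List.getElem?_set_self (by rw [ihlen]; exact hc)]
            rw [if_pos ⟨by omega, by simpa using hbc⟩]
            rw [hgc, hgx]
            rfl
          · rw [List.getD_eq_getElem?_getD, List.getElem?_set_ne (fun h => hic h.symm),
              ← List.getD_eq_getElem?_getD, ihval i]
            have : (i < c + 1 ∧ (i &&& 2 ^ k != 0) = true) ↔ (i < c ∧ (i &&& 2 ^ k != 0) = true) := by
              constructor
              · rintro ⟨h1, h2⟩; exact ⟨by omega, h2⟩
              · rintro ⟨h1, h2⟩; exact ⟨by omega, h2⟩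
            by_cases hcond : i < c ∧ (i &&& 2 ^ k != 0) = true
            · rw [if_pos hcond, if_pos (this.mpr hcond)]
            · rw [if_neg hcond, if_neg (this.mp.mt hcond)]
  rw [sosPass]
  rw [(H v.length (le_refl _)).2 j]
  simp [hj]

-- one pass advances the invariant by one bit
theorem Vfun_step (w : Nat → Int) (k j : Nat) :
    Vfun w (k + 1) j =
      if j &&& 2 ^ k != 0 then (Vfun w k j + Vfun w k (j ^^^ 2 ^ k)) % 2 else Vfun w k j := by
  obtain ⟨hd, hr⟩ := pv_decomp j k
  have hpk : 0 < 2 ^ k := Nat.two_pow_pos k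
  cases htb : j.testBit k
  · -- bit k clear: nothing changes
    have hz : j &&& 2 ^ k = 0 := by
      by_contra hne
      rw [(pv_and_pow_ne_zero _ _).mp hne] at htb
      simp at htb
    rw [htb] at hd
    simp only [Bool.false_eq_true, if_neg, not_false_eq_true, Nat.zero_mul,
      Nat.add_zero] at hd
    have hm1 : j % 2 ^ (k + 1) = j % 2 ^ k := by
      conv_lhs => rw [hd]
      rw [Nat.mul_add_mod, Nat.mod_eq_of_lt (by
        have : (2:Nat) ^ (k+1) = 2 * 2 ^ k := by ring
        omega)]
    simp [hz, Vfun, hm1]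
  · -- bit k set: combine with the partner index
    have hbc : (j &&& 2 ^ k != 0) = true := by
      simp [(pv_and_pow_ne_zero j k).mpr htb]
    obtain ⟨hxsum, hxbit⟩ := pv_xor_pow htb
    set j' := j ^^^ 2 ^ k with hj'
    set q := j / 2 ^ (k + 1) with hq
    set r := j % 2 ^ k with hrr
    rw [htb] at hd
    simp only [if_pos, Nat.one_mul] at hd
    have hpow : (2:Nat) ^ (k + 1) = 2 * 2 ^ k := by ring
    have hj'd : j' = 2 ^ (k + 1) * q + r := by omega
    have hm1 : j % 2 ^ (k + 1) = 2 ^ k + r := by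
      conv_lhs => rw [hd, Nat.add_assoc]
      rw [Nat.mul_add_mod, Nat.mod_eq_of_lt (by omega)]
    have hm2 : j' % 2 ^ k = r := by
      have h2 : j' = 2 ^ k * (2 * q) + r := by rw [hj'd]; ring
      rw [h2, Nat.mul_add_mod, Nat.mod_eq_of_lt hr]
    have hm3 : j' % 2 ^ (k + 1) = r := by
      rw [hj'd, Nat.mul_add_mod, Nat.mod_eq_of_lt (by omega)]
    rw [if_pos hbc]
    simp only [Vfun, hm1, hm2]
    have hne1 : ¬ (2 ^ k + r = 0) := by omega
    rw [if_neg hne1]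
    have hsplit := gsum_split (w := fun l => w (j - (2 ^ k + r) + l)) hr
    by_cases hr0 : r = 0
    · rw [if_pos hr0, if_pos hr0]
      simp only [hr0, Nat.add_zero] at hsplit ⊢
      rw [hsplit, gsum_zero, gsum_zero]
      have e1 : j - 2 ^ k + 0 = j' := by omega
      have e2 : j - 2 ^ k + (2 ^ k + 0) = j := by omega
      rw [e1, e2, Int.add_comm]
    · rw [if_neg hr0, if_neg hr0]
      rw [hsplit]
      have e1 : gsum (fun l => w (j - (2 ^ k + r) + l)) r
          = gsum (fun l => w (j' - r + l)) r := by
        apply gsum_congr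
        intro i
        congr 1
        omega
      have e2 : gsum (fun i => w (j - (2 ^ k + r) + (2 ^ k + i))) r
          = gsum (fun l => w (j - r + l)) r := by
        apply gsum_congr
        intro i
        congr 1
        omega
      rw [e1, e2, Int.add_emod]
      simp only [← hrr]
      omega

theorem sosLoop_model (L : Nat) (w : Nat → Int) :
    ∀ k (v : List Int), v.length = L → (∀ j < L, v.getD j 0 = Vfun w k j) →
      (sosLoop L k v).length = L ∧ ∀ j < L, (sosLoop L k v).getD j 0 = Gv w j := by
  suffices H : ∀ n k (v : List Int), L - k = n → v.length = L →
      (∀ j < L, v.getD j 0 = Vfun w k j) →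
      (sosLoop L k v).length = L ∧ ∀ j < L, (sosLoop L k v).getD j 0 = Gv w j by
    exact fun k v h1 h2 => H (L - k) k v rfl h1 h2
  intro n
  induction n using Nat.strong_induction_on with
  | _ n ih =>
      intro k v hnk hlen hinv
      rw [sosLoop]
      by_cases h : 2 ^ k < L
      · rw [if_pos h]
        have hklt : k < L := by
          have := Nat.lt_two_pow_self (n := k)
          omega
        apply ih (L - (k + 1)) (by omega) (k + 1) _ rfl
        · rw [sosPass_length]; exact hlen
        · intro j hj
          rw [sosPass_getD k v j (by omega)]
          rw [Vfun_step]
          cases hc : (j &&& 2 ^ k != 0)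
          · rw [if_neg (by simp []), if_neg (by simp []), hinv j hj]
          · have htb : j.testBit k = true := by
              apply (pv_and_pow_ne_zero j k).mp
              simpa using hc
            obtain ⟨hxsum, _⟩ := pv_xor_pow htb
            have hxlt : j ^^^ 2 ^ k < L := by
              have := Nat.two_pow_pos k
              omega
            rw [if_pos (by simp []), if_pos (by simp []), hinv j hj, hinv _ hxlt]
      · rw [if_neg h]
        refine ⟨hlen, fun j hj => ?_⟩
        rw [hinv j hj]
        have hm : j % 2 ^ k = j := Nat.mod_eq_of_lt (by omega)
        rw [Vfun, Gv, hm]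
        by_cases hj0 : j = 0
        · simp [hj0]
        · rw [if_neg hj0, if_neg hj0]
          congr 1
          apply gsum_congr
          intro i
          congr 1
          omega

/- ---------- assembling the two results ---------- -/

theorem pv_final_eq (tbl : List (List Int)) (g : Nat → Int) :
    (tbl.mapIdx (fun j r => pvSetLast r (g j))).filter (fun r => pvLast r == 1)
      = (tbl.zip ((List.range tbl.length).map g)).filterMap (fun rv =>
          if rv.2 == 1 then some (rv.1.dropLast ++ [rv.2]) else none) := by
  induction tbl generalizing g with
  | nil => rfl
  | cons r tbl ih =>
      rw [List.mapIdx_cons, List.filter_cons, List.length_cons, List.range_succ_eq_map,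
        List.map_cons, List.map_map, List.zip_cons_cons, List.filterMap_cons]
      have hh : (pvLast (pvSetLast r (g 0)) == 1) = (g 0 == 1) := by
        rw [pvLast_setLast]
      rw [hh]
      have hmap : (List.range tbl.length).map (g ∘ Nat.succ)
          = (List.range tbl.length).map (fun i => g (i + 1)) := rfl
      cases h : (g 0 == 1)
      · simp only [Bool.false_eq_true, if_neg, not_false_eq_true]
        rw [hmap, ih (fun i => g (i + 1))]
      · simp only [ite_true]
        rw [hmap, ih (fun i => g (i + 1))]
        rfl

-- ===== VERDICT (by name: the statement is the Claim_ definition above) =====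
theorem zhegalkin_reduce_spec : Claim_equal_zhegalkin_reduce := by
  unfold Claim_equal_zhegalkin_reduce
  intro tbl _ hPre
  obtain ⟨hne0, hne⟩ := hPre
  unfold Spec_zhegalkin_reduce
  set w : Nat → Int := fun i => pvLast (tbl.getD i []) with hw
  -- A computes the filtered model
  have hA : zhegalkin_reduce tbl
      = (modelT tbl w (tbl.length)).filter (fun r => pvLast r == 1) := by
    unfold zhegalkin_reduce
    simp only [List.map_id']
    rw [pv_outer_model tbl hne tbl.length (le_refl _)]
  -- the model is a uniform mapIdx once every row is processed
  have hM : modelT tbl w tbl.length = tbl.mapIdx (fun j r => pvSetLast r (Gv w j)) := by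
    apply List.ext_getElem (by simp [modelT])
    intro j h1 h2
    simp only [modelT, List.getElem_mapIdx]
    rw [if_pos (by simpa [modelT] using h1)]
  -- B computes the same column of values
  have hB : sosLoop tbl.length 0 (tbl.map pvLast) = (List.range tbl.length).map (Gv w) := by
    have hinit : ∀ j < tbl.length, (tbl.map pvLast).getD j 0 = Vfun w 0 j := by
      intro j hj
      have hVf : Vfun w 0 j = w j := by
        rw [Vfun]
        simp [Nat.mod_one]
      rw [hVf, List.getD_eq_getElem?_getD,
        List.getElem?_eq_getElem (by rwa [List.length_map]), Option.getD_some,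
        List.getElem_map, hw]
      simp only []
      rw [List.getD_eq_getElem?_getD, List.getElem?_eq_getElem hj]
      rfl
    obtain ⟨hlen, hval⟩ := sosLoop_model tbl.length w 0 (tbl.map pvLast) (by simp) hinit
    apply List.ext_getElem (by rw [hlen, List.length_map, List.length_range])
    intro j h1 h2
    have hjL : j < tbl.length := by rwa [hlen] at h1
    have hv := hval j hjL
    rw [List.getD_eq_getElem?_getD, List.getElem?_eq_getElem h1] at hv
    simp only [Option.getD_some] at hv
    rw [hv, List.getElem_map, List.getElem_range]
  rw [hA, hM, zhegalkin_reduce_alt]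
  simp only [hB]
  exact pv_final_eq tbl (Gv w)
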